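-- pv_equiv track=rewrite | github.com/lgragert/virtual-crossmatch | vxm_tool/ancillary_funcs.py | group_allele_codes_per_locus
-- ===== SOURCE A (Python) =====
-- def group_allele_codes_per_locus(donor_typing_list, donor_bws_string):
-- 	'''Allele codes are grouped according to loci'''
-- 	donor_a_alleles = []
-- 	donor_b_alleles = []
-- 	donor_c_alleles = []
-- 	donor_dr_alleles = []
-- 	donor_drb345_alleles = []
-- 	donor_dq_alleles = []
--
--
-- 	for i in donor_typing_list:
-- 		locus = i.split("*")[0]
-- 		if locus == "A":
-- 			donor_a_alleles.append(i)
--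
-- 		if locus == "B":
-- 			donor_b_alleles.append(i)
--
-- 		if locus == "C":
-- 			donor_c_alleles.append(i)
--
-- 		if (locus == "DRB1"):
-- 			donor_dr_alleles.append(i)
--
-- 		if (locus == "DRB3") or (locus == "DRB4") or (locus == "DRB5"):
-- 			donor_drb345_alleles.append(i)
--
-- 		if (locus == "DQB1") or (locus == "DQA1"):
-- 			donor_dq_alleles.append(i)
--
-- 	bw_string = donor_bws_string
--
-- 	final_typing_list = [", ".join(sorted(donor_a_alleles))] + [", ".join(sorted(donor_b_alleles))] + [bw_string] + [", ".join(sorted(donor_c_alleles))] + [", ".join(sorted(donor_dr_alleles))] + [", ".join(sorted(donor_drb345_alleles))] + [", ".join(sorted(donor_dq_alleles))]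
--
-- 	return final_typing_list
-- ===== SOURCE B (Python) =====
-- def group_allele_codes_per_locus(donor_typing_list, donor_bws_string):
--     '''Decorate-sort-stitch: one lexicographic sort on a composite (slot, allele) key
--     groups and orders everything at once; a linear stitch then builds the seven output
--     strings directly by concatenation (no per-locus bucket lists, no joins).'''
--     slot = {"A": 0, "B": 1, "C": 2, "DRB1": 3,
--             "DRB3": 4, "DRB4": 4, "DRB5": 4, "DQB1": 5, "DQA1": 5}
--     keyed = sorted((a for a in donor_typing_list if a.split("*")[0] in slot),
--                    key=lambda a: (slot[a.split("*")[0]], a))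
--     parts = [None] * 6
--     for a in keyed:
--         k = slot[a.split("*")[0]]
--         parts[k] = a if parts[k] is None else parts[k] + ", " + a
--     out = ["" if p is None else p for p in parts]
--     return out[:2] + [donor_bws_string] + out[2:]
-- ===== Notes on version B (the rewrite author's own statement) =====
-- stated objective: alternative
-- what changed: A buckets the unsorted list into six lists and sorts and joins each bucket separately; B performs one lexicographic sort on a composite (slot, allele) key over the filtered list and then builds the seven output strings directly in a single linear stitch by string concatenation (no bucket lists, no joins, no per-bucket sorts).
import Mathlib
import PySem

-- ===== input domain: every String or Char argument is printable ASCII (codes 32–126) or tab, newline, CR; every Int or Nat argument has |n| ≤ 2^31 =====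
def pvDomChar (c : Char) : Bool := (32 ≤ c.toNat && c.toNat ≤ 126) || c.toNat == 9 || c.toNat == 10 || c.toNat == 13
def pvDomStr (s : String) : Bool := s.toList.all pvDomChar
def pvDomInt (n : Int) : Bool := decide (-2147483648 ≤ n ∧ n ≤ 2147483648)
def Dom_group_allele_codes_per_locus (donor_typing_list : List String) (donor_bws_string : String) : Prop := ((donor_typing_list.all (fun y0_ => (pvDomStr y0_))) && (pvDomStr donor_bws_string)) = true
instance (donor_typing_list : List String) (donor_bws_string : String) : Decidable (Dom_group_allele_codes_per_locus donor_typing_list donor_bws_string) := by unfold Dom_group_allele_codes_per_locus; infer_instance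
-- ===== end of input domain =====

-- B replaces A's six bucket lists + six per-bucket sorts by ONE lexicographic sort on a
-- composite (slot, allele) key followed by a linear stitch that concatenates the output
-- strings directly (no bucket lists, no joins); same result, proved equal.

-- ===== PORT A =====
-- locus = i.split("*")[0]  (split with a nonempty separator always yields a nonempty list,
-- so taking the head is exact)
def pvLocus (i : String) : String := (((PySem.Str.split? i "*").getD []).headD "")

-- the loop body of A: six accumulator lists, independent ifs in A's order
def pvStepA (acc : List String × List String × List String × List String × List String × List String)
    (i : String) : List String × List String × List String × List String × List String × List String :=
  let locus := pvLocus i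
  (if locus = "A" then acc.1 ++ [i] else acc.1,
   if locus = "B" then acc.2.1 ++ [i] else acc.2.1,
   if locus = "C" then acc.2.2.1 ++ [i] else acc.2.2.1,
   if locus = "DRB1" then acc.2.2.2.1 ++ [i] else acc.2.2.2.1,
   if locus = "DRB3" ∨ locus = "DRB4" ∨ locus = "DRB5" then acc.2.2.2.2.1 ++ [i] else acc.2.2.2.2.1,
   if locus = "DQB1" ∨ locus = "DQA1" then acc.2.2.2.2.2 ++ [i] else acc.2.2.2.2.2)

def group_allele_codes_per_locus (donor_typing_list : List String) (donor_bws_string : String) : List String :=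
  let acc := donor_typing_list.foldl pvStepA ([], [], [], [], [], [])
  let bw_string := donor_bws_string
  [PySem.Str.join ", " (PySem.List.sorted acc.1 (fun x => x) false)] ++
  [PySem.Str.join ", " (PySem.List.sorted acc.2.1 (fun x => x) false)] ++
  [bw_string] ++
  [PySem.Str.join ", " (PySem.List.sorted acc.2.2.1 (fun x => x) false)] ++
  [PySem.Str.join ", " (PySem.List.sorted acc.2.2.2.1 (fun x => x) false)] ++
  [PySem.Str.join ", " (PySem.List.sorted acc.2.2.2.2.1 (fun x => x) false)] ++
  [PySem.Str.join ", " (PySem.List.sorted acc.2.2.2.2.2 (fun x => x) false)]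

-- ===== PORT B =====
-- slot = {...}  (locus -> output position)
def pvSlot : PySem.Dict String Int :=
  PySem.Dict.ofList [("A", 0), ("B", 1), ("C", 2), ("DRB1", 3),
                     ("DRB3", 4), ("DRB4", 4), ("DRB5", 4), ("DQB1", 5), ("DQA1", 5)]

-- key=lambda a: (slot[a.split("*")[0]], a) — the lookup is only applied to elements that
-- passed the 'in slot' filter, where slot[…] = getD … 0 exactly
def pvKey1 (a : String) : Int := pvSlot.getD (pvLocus a) 0

-- parts[k] = a if parts[k] is None else parts[k] + ", " + a
def pvJoinStep (o : Option String) (a : String) : Option String :=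
  some (match o with | none => a | some s => s ++ ", " ++ a)

-- the stitch loop body: k = slot[a.split("*")[0]]; parts[k] = …  (k is always 0..5 here,
-- so reading with pyGet?/getD and writing with set at k.toNat is exact)
def pvStepB (parts : List (Option String)) (a : String) : List (Option String) :=
  let k : Int := pvKey1 a
  parts.set k.toNat (pvJoinStep ((PySem.List.pyGet? parts k).getD none) a)

def group_allele_codes_per_locus_alt (donor_typing_list : List String) (donor_bws_string : String) : List String :=
  let keyed := PySem.List.sorted2 (donor_typing_list.filter (fun a => pvSlot.contains (pvLocus a)))
                 pvKey1 (fun a => a) false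
  let parts := keyed.foldl pvStepB (List.replicate 6 none)
  let out := parts.map (fun p => p.getD "")
  PySem.List.slice out none (some 2) ++ [donor_bws_string] ++ PySem.List.slice out (some 2) none

-- ===== PRECONDITION & SPEC =====
def Spec_group_allele_codes_per_locus (donor_typing_list : List String) (donor_bws_string : String) (out : List String) : Prop := out = group_allele_codes_per_locus_alt donor_typing_list donor_bws_string
instance (donor_typing_list : List String) (donor_bws_string : String) (out : List String) : Decidable (Spec_group_allele_codes_per_locus donor_typing_list donor_bws_string out) := by unfold Spec_group_allele_codes_per_locus; infer_instance

-- ===== CLAIM (what is proved, stated in full; the proofs are below) =====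
def Claim_equal_group_allele_codes_per_locus : Prop := ∀ (donor_typing_list : List String) (donor_bws_string : String), Dom_group_allele_codes_per_locus donor_typing_list donor_bws_string → Spec_group_allele_codes_per_locus donor_typing_list donor_bws_string (group_allele_codes_per_locus donor_typing_list donor_bws_string)

-- ===== LEMMAS AND PROOFS =====

-- A's loop is six filters
lemma foldl_pvStepA (l : List String) (a b c dr d345 dq : List String) :
    l.foldl pvStepA (a, b, c, dr, d345, dq) =
      (a ++ l.filter (fun i => pvLocus i = "A"),
       b ++ l.filter (fun i => pvLocus i = "B"),
       c ++ l.filter (fun i => pvLocus i = "C"),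
       dr ++ l.filter (fun i => pvLocus i = "DRB1"),
       d345 ++ l.filter (fun i => pvLocus i = "DRB3" ∨ pvLocus i = "DRB4" ∨ pvLocus i = "DRB5"),
       dq ++ l.filter (fun i => pvLocus i = "DQB1" ∨ pvLocus i = "DQA1")) := by
  induction l generalizing a b c dr d345 dq with
  | nil => simp
  | cons x xs ih =>
    simp only [List.foldl_cons, pvStepA, ih, List.filter_cons, Prod.mk.injEq]
    refine ⟨?_, ?_, ?_, ?_, ?_, ?_⟩
    · by_cases h : pvLocus x = "A" <;> simp [h]
    · by_cases h : pvLocus x = "B" <;> simp [h]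
    · by_cases h : pvLocus x = "C" <;> simp [h]
    · by_cases h : pvLocus x = "DRB1" <;> simp [h]
    · by_cases h : pvLocus x = "DRB3" ∨ pvLocus x = "DRB4" ∨ pvLocus x = "DRB5" <;> simp [h]
    · by_cases h : pvLocus x = "DQB1" ∨ pvLocus x = "DQA1" <;> simp [h]

-- pvSlot.get? as a decision chain
lemma pvSlot_get? (s : String) :
    pvSlot.get? s =
      if s = "A" then some 0 else if s = "B" then some 1 else if s = "C" then some 2
      else if s = "DRB1" then some 3 else if s = "DRB3" then some 4
      else if s = "DRB4" then some 4 else if s = "DRB5" then some 4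
      else if s = "DQB1" then some 5 else if s = "DQA1" then some 5 else none := by
  have h : pvSlot.items = [("A", 0), ("B", 1), ("C", 2), ("DRB1", 3),
      ("DRB3", 4), ("DRB4", 4), ("DRB5", 4), ("DQB1", 5), ("DQA1", 5)] := by rfl
  simp only [PySem.Dict.get?, h, List.find?_cons]
  by_cases h1 : s = "A"
  · subst h1; simp
  rw [show ("A" == s) = false from beq_eq_false_iff_ne.mpr (Ne.symm h1)]
  by_cases h2 : s = "B"
  · subst h2; simp
  rw [show ("B" == s) = false from beq_eq_false_iff_ne.mpr (Ne.symm h2)]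
  by_cases h3 : s = "C"
  · subst h3; simp
  rw [show ("C" == s) = false from beq_eq_false_iff_ne.mpr (Ne.symm h3)]
  by_cases h4 : s = "DRB1"
  · subst h4; simp
  rw [show ("DRB1" == s) = false from beq_eq_false_iff_ne.mpr (Ne.symm h4)]
  by_cases h5 : s = "DRB3"
  · subst h5; simp
  rw [show ("DRB3" == s) = false from beq_eq_false_iff_ne.mpr (Ne.symm h5)]
  by_cases h6 : s = "DRB4"
  · subst h6; simp
  rw [show ("DRB4" == s) = false from beq_eq_false_iff_ne.mpr (Ne.symm h6)]
  by_cases h7 : s = "DRB5"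
  · subst h7; simp
  rw [show ("DRB5" == s) = false from beq_eq_false_iff_ne.mpr (Ne.symm h7)]
  by_cases h8 : s = "DQB1"
  · subst h8; simp
  rw [show ("DQB1" == s) = false from beq_eq_false_iff_ne.mpr (Ne.symm h8)]
  by_cases h9 : s = "DQA1"
  · subst h9; simp
  rw [show ("DQA1" == s) = false from beq_eq_false_iff_ne.mpr (Ne.symm h9)]
  simp [h1, h2, h3, h4, h5, h6, h7, h8, h9]

-- the 'before' relation sorted2 uses (reverse = false, identity second key)
def pvBefore (a b : String) : Bool :=
  decide (pvKey1 a < pvKey1 b) || (!decide (pvKey1 b < pvKey1 a) && decide (a < b))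

-- the order sorted2 guarantees between earlier and later elements
def pvSRel (a b : String) : Prop := pvBefore b a = false

lemma pvBefore_eq_true_iff (a b : String) :
    pvBefore a b = true ↔ (pvKey1 a < pvKey1 b ∨ (pvKey1 a = pvKey1 b ∧ a < b)) := by
  simp only [pvBefore, Bool.or_eq_true, Bool.and_eq_true, Bool.not_eq_true', decide_eq_true_eq,
    decide_eq_false_iff_not]
  constructor
  · rintro (h | ⟨h1, h2⟩)
    · exact Or.inl h
    · rcases lt_trichotomy (pvKey1 a) (pvKey1 b) with hh | hh | hh
      · exact Or.inl hh
      · exact Or.inr ⟨hh, h2⟩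
      · exact absurd hh h1
  · rintro (h | ⟨h1, h2⟩)
    · exact Or.inl h
    · exact Or.inr ⟨by rw [h1]; exact lt_irrefl _, h2⟩

lemma pvBefore_eq_false_iff (a b : String) :
    pvBefore a b = false ↔ ¬ (pvKey1 a < pvKey1 b ∨ (pvKey1 a = pvKey1 b ∧ a < b)) := by
  rw [← pvBefore_eq_true_iff]
  exact Bool.eq_false_iff

lemma pvBefore_asymm {a b : String} (h : pvBefore a b = true) : pvBefore b a = false := by
  rw [pvBefore_eq_true_iff] at h
  rw [pvBefore_eq_false_iff]
  rintro (h' | ⟨h1', h2'⟩)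
  · rcases h with h | ⟨h1, _⟩
    · exact absurd h' (lt_asymm h)
    · rw [h1] at h'; exact lt_irrefl _ h'
  · rcases h with h | ⟨h1, h2⟩
    · rw [h1'] at h; exact lt_irrefl _ h
    · exact lt_irrefl _ (lt_trans h2 h2')

lemma pvBefore_negtrans {a b c : String} (hab : pvBefore a b = false)
    (hbc : pvBefore b c = false) : pvBefore a c = false := by
  rw [pvBefore_eq_false_iff] at *
  push_neg at hab hbc
  obtain ⟨hk1, h2⟩ := hab
  obtain ⟨hk1', h2'⟩ := hbc
  rintro (h | ⟨he, hs⟩)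
  · exact absurd h (not_lt.mpr (le_trans hk1' hk1))
  · have hkab : pvKey1 a = pvKey1 b := le_antisymm (by rw [he]; exact hk1') hk1
    have hkbc : pvKey1 b = pvKey1 c := by rw [← hkab, he]
    exact absurd hs (not_lt.mpr (le_trans (h2' hkbc) (h2 hkab)))

lemma pairwise_insertBy (x : String) (ys : List String) (h : ys.Pairwise pvSRel) :
    (PySem.List.insertBy pvBefore x ys).Pairwise pvSRel := by
  induction ys with
  | nil => simp [PySem.List.insertBy]
  | cons y ys ih =>
    rcases h with _ | ⟨hy, hys⟩
    by_cases hxy : pvBefore x y = true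
    · rw [show PySem.List.insertBy pvBefore x (y :: ys) = x :: y :: ys from by
        simp [PySem.List.insertBy, hxy]]
      refine List.Pairwise.cons ?_ (List.Pairwise.cons hy hys)
      intro z hz
      rcases List.mem_cons.mp hz with rfl | hz
      · exact pvBefore_asymm hxy
      · exact pvBefore_negtrans (hy z hz) (pvBefore_asymm hxy)
    · rw [show PySem.List.insertBy pvBefore x (y :: ys) = y :: PySem.List.insertBy pvBefore x ys from by
        simp [PySem.List.insertBy, hxy]]
      refine List.Pairwise.cons ?_ (ih hys)
      intro z hz
      rcases (PySem.List.mem_insertBy pvBefore x z ys).mp hz with rfl | hz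
      · exact Bool.eq_false_iff.mpr hxy
      · exact hy z hz

lemma pairwise_foldl_insertBy (xs : List String) (acc : List String) (hacc : acc.Pairwise pvSRel) :
    (xs.foldl (fun acc x => PySem.List.insertBy pvBefore x acc) acc).Pairwise pvSRel := by
  induction xs generalizing acc with
  | nil => exact hacc
  | cons x xs ih => exact ih _ (pairwise_insertBy x acc hacc)

lemma sorted2_pairwise_pvSRel (xs : List String) :
    (PySem.List.sorted2 xs pvKey1 (fun a => a) false).Pairwise pvSRel := by
  have : PySem.List.sorted2 xs pvKey1 (fun a => a) false =
      xs.foldl (fun acc x => PySem.List.insertBy pvBefore x acc) [] := by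
    rfl
  rw [this]
  exact pairwise_foldl_insertBy xs [] (by simp)

-- unfolding pvSRel
lemma pvSRel_iff (a b : String) : pvSRel a b ↔ pvKey1 a ≤ pvKey1 b ∧ (pvKey1 b ≤ pvKey1 a → a ≤ b) := by
  unfold pvSRel
  rw [pvBefore_eq_false_iff]
  push_neg
  constructor
  · rintro ⟨h1, h2⟩
    exact ⟨h1, fun hba => h2 (le_antisymm hba h1)⟩
  · rintro ⟨h1, h2⟩
    exact ⟨h1, fun he => h2 (le_of_eq he)⟩

-- the stitch fold, read at one slot: it folds pvJoinStep over the elements headed there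
lemma foldl_pvStepB_getElem? (lst : List String) (parts : List (Option String)) (j : Nat)
    (hj : j < parts.length)
    (helems : ∀ a ∈ lst, ∃ k : Nat, k < parts.length ∧ pvKey1 a = (k : Int)) :
    (lst.foldl pvStepB parts)[j]? =
      some ((lst.filter (fun a => pvKey1 a = (j : Int))).foldl pvJoinStep (parts[j]?.getD none)) := by
  induction lst generalizing parts with
  | nil => simp [List.getElem?_eq_getElem hj]
  | cons x xs ih =>
    obtain ⟨k, hk, hkey⟩ := helems x (List.mem_cons_self)
    have hstep : pvStepB parts x = parts.set k (pvJoinStep (parts[k]?.getD none) x) := by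
      simp only [pvStepB, hkey, PySem.List.pyGet?_natCast, Int.toNat_natCast]
    rw [List.foldl_cons, hstep, List.filter_cons]
    have hlen : (parts.set k (pvJoinStep (parts[k]?.getD none) x)).length = parts.length := by simp
    have ihx := ih (parts.set k (pvJoinStep (parts[k]?.getD none) x)) (by omega)
      (fun a ha => by obtain ⟨k', hk', h'⟩ := helems a (List.mem_cons_of_mem _ ha); exact ⟨k', by omega, h'⟩)
    rw [ihx]
    by_cases hkj : k = j
    · subst hkj
      simp [hkey, hk]
    · have : ¬ (pvKey1 x = (j : Int)) := by rw [hkey]; omega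
      simp [this, hkj]

-- the length of parts never changes
lemma length_foldl_pvStepB (lst : List String) (parts : List (Option String)) :
    (lst.foldl pvStepB parts).length = parts.length := by
  induction lst generalizing parts with
  | nil => rfl
  | cons x xs ih => rw [List.foldl_cons]; rw [ih]; simp [pvStepB]

-- Python ", ".join(x :: xs) absorbs its first two pieces
lemma join_cons_cons (x y : String) (ys : List String) :
    PySem.Str.join ", " (x :: y :: ys) = PySem.Str.join ", " ((x ++ ", " ++ y) :: ys) := by
  apply String.toList_inj.mp
  rw [PySem.Str.toList_join, PySem.Str.toList_join]
  simp only [List.map_cons, PySem.Chars.join_cons_cons, String.toList_append]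
  cases ys with
  | nil => simp [PySem.Chars.join_singleton]
  | cons z zs => simp [PySem.Chars.join_cons_cons]

-- the incremental concatenation computes ", ".join
lemma foldl_pvJoinStep_some (xs : List String) (x : String) :
    xs.foldl pvJoinStep (some x) = some (PySem.Str.join ", " (x :: xs)) := by
  induction xs generalizing x with
  | nil =>
    rw [List.foldl_nil]
    apply congrArg
    apply String.toList_inj.mp
    rw [PySem.Str.toList_join]
    simp [PySem.Chars.join_singleton]
  | cons y ys ih =>
    rw [List.foldl_cons, show pvJoinStep (some x) y = some (x ++ ", " ++ y) from rfl, ih,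
      ← join_cons_cons]

lemma foldl_pvJoinStep_none (xs : List String) :
    (xs.foldl pvJoinStep none).getD "" = PySem.Str.join ", " xs := by
  cases xs with
  | nil => rfl
  | cons x xs =>
    rw [List.foldl_cons, show pvJoinStep none x = some x from rfl, foldl_pvJoinStep_some]
    rfl

-- contains is the isSome of get?
lemma pvSlot_contains (s : String) : pvSlot.contains s = (pvSlot.get? s).isSome := by
  simp only [PySem.Dict.contains, PySem.Dict.get?, Option.isSome_map]
  induction pvSlot.items with
  | nil => rfl
  | cons x xs ih => by_cases h : x.1 == s <;> simp [List.any_cons, List.find?_cons, h, ih]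

-- every key the dict knows is sent to a slot 0..5
lemma pvKey1_mem_bound (a : String) (h : pvSlot.contains (pvLocus a) = true) :
    ∃ k : Nat, k < 6 ∧ pvKey1 a = (k : Int) := by
  rw [show pvKey1 a = (pvSlot.get? (pvLocus a)).getD 0 from rfl]
  rw [pvSlot_contains] at h
  rcases hg : pvSlot.get? (pvLocus a) with _ | v
  · rw [hg] at h; simp at h
  · have hch := pvSlot_get? (pvLocus a)
    rw [hg] at hch
    split_ifs at hch <;>
      (injection hch with hv; exact ⟨v.toNat, by omega, by simp [hg]; omega⟩)

-- one slot of the sorted2 list, filtered out, is A's sorted bucket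
lemma bucket_main (l : List String) (j : Nat) (p : String → Bool)
    (hpt : ∀ a : String, ((pvSlot.contains (pvLocus a)) && decide (pvKey1 a = (j : Int))) = p a) :
    PySem.List.sorted (l.filter p) (fun x => x) false =
      (PySem.List.sorted2 (l.filter (fun a => pvSlot.contains (pvLocus a))) pvKey1 (fun a => a) false).filter
        (fun a => decide (pvKey1 a = (j : Int))) := by
  apply PySem.List.sorted_id_eq_of_perm_of_pairwise
  · have h1 := (PySem.List.sorted2_perm (l.filter (fun a => pvSlot.contains (pvLocus a)))
      pvKey1 (fun a => a) false).filter (fun a => decide (pvKey1 a = (j : Int)))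
    rw [List.filter_filter] at h1
    have h2 : l.filter (fun a => decide (pvKey1 a = (j : Int)) && pvSlot.contains (pvLocus a))
        = l.filter p := by
      apply List.filter_congr
      intro a _
      rw [← hpt a, Bool.and_comm]
    rwa [h2] at h1
  · refine List.Pairwise.imp_of_mem ?_ (List.Pairwise.filter _ (sorted2_pairwise_pvSRel _))
    intro a b ha hb hr
    have hja := (List.mem_filter.mp ha).2
    have hjb := (List.mem_filter.mp hb).2
    simp only [decide_eq_true_eq] at hja hjb
    exact ((pvSRel_iff a b).mp hr).2 (by rw [hja, hjb])

-- the six pointwise slot characterisations (one per output position)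
lemma hpt_slot0 (a : String) :
    ((pvSlot.contains (pvLocus a)) && decide (pvKey1 a = ((0 : Nat) : Int)))
      = decide (pvLocus a = "A") := by
  rw [pvSlot_contains, show pvKey1 a = (pvSlot.get? (pvLocus a)).getD 0 from rfl, pvSlot_get?]
  split_ifs <;> first | (subst_vars; decide) | simp_all

lemma hpt_slot1 (a : String) :
    ((pvSlot.contains (pvLocus a)) && decide (pvKey1 a = ((1 : Nat) : Int)))
      = decide (pvLocus a = "B") := by
  rw [pvSlot_contains, show pvKey1 a = (pvSlot.get? (pvLocus a)).getD 0 from rfl, pvSlot_get?]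
  split_ifs <;> first | (subst_vars; decide) | simp_all

lemma hpt_slot2 (a : String) :
    ((pvSlot.contains (pvLocus a)) && decide (pvKey1 a = ((2 : Nat) : Int)))
      = decide (pvLocus a = "C") := by
  rw [pvSlot_contains, show pvKey1 a = (pvSlot.get? (pvLocus a)).getD 0 from rfl, pvSlot_get?]
  split_ifs <;> first | (subst_vars; decide) | simp_all

lemma hpt_slot3 (a : String) :
    ((pvSlot.contains (pvLocus a)) && decide (pvKey1 a = ((3 : Nat) : Int)))
      = decide (pvLocus a = "DRB1") := by
  rw [pvSlot_contains, show pvKey1 a = (pvSlot.get? (pvLocus a)).getD 0 from rfl, pvSlot_get?]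
  split_ifs <;> first | (subst_vars; decide) | simp_all

lemma hpt_slot4 (a : String) :
    ((pvSlot.contains (pvLocus a)) && decide (pvKey1 a = ((4 : Nat) : Int)))
      = decide (pvLocus a = "DRB3" ∨ pvLocus a = "DRB4" ∨ pvLocus a = "DRB5") := by
  rw [pvSlot_contains, show pvKey1 a = (pvSlot.get? (pvLocus a)).getD 0 from rfl, pvSlot_get?]
  split_ifs <;> first | (subst_vars; decide) | simp_all

lemma hpt_slot5 (a : String) :
    ((pvSlot.contains (pvLocus a)) && decide (pvKey1 a = ((5 : Nat) : Int)))
      = decide (pvLocus a = "DQB1" ∨ pvLocus a = "DQA1") := by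
  rw [pvSlot_contains, show pvKey1 a = (pvSlot.get? (pvLocus a)).getD 0 from rfl, pvSlot_get?]
  split_ifs <;> first | (subst_vars; decide) | simp_all

-- ===== VERDICT (by name: the statement is the Claim_ definition above) =====
set_option maxHeartbeats 2000000 in
theorem group_allele_codes_per_locus_spec : Claim_equal_group_allele_codes_per_locus := by
  intro l bws _
  unfold Spec_group_allele_codes_per_locus group_allele_codes_per_locus group_allele_codes_per_locus_alt
  dsimp only
  rw [foldl_pvStepA]
  set K := PySem.List.sorted2 (l.filter (fun a => pvSlot.contains (pvLocus a)))
    pvKey1 (fun a => a) false with hK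
  have helems : ∀ a ∈ K, ∃ k : Nat, k < (List.replicate 6 (none : Option String)).length ∧
      pvKey1 a = (k : Int) := by
    intro a ha
    have hmem : a ∈ l.filter (fun a => pvSlot.contains (pvLocus a)) :=
      ((PySem.List.sorted2_perm _ pvKey1 (fun a => a) false).mem_iff).mp ha
    have hc := (List.mem_filter.mp hmem).2
    simpa using pvKey1_mem_bound a hc
  have hparts : ∀ j : Nat, j < 6 → (K.foldl pvStepB (List.replicate 6 none))[j]? =
      some ((K.filter (fun a => decide (pvKey1 a = (j : Int)))).foldl pvJoinStep none) := by
    intro j hj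
    have h := foldl_pvStepB_getElem? K (List.replicate 6 none) j (by simpa using hj) helems
    rwa [List.getElem?_replicate, if_pos hj, Option.getD_some] at h
  have hexp : K.foldl pvStepB (List.replicate 6 none) =
      [(K.filter (fun a => decide (pvKey1 a = ((0 : Nat) : Int)))).foldl pvJoinStep none,
       (K.filter (fun a => decide (pvKey1 a = ((1 : Nat) : Int)))).foldl pvJoinStep none,
       (K.filter (fun a => decide (pvKey1 a = ((2 : Nat) : Int)))).foldl pvJoinStep none,
       (K.filter (fun a => decide (pvKey1 a = ((3 : Nat) : Int)))).foldl pvJoinStep none,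
       (K.filter (fun a => decide (pvKey1 a = ((4 : Nat) : Int)))).foldl pvJoinStep none,
       (K.filter (fun a => decide (pvKey1 a = ((5 : Nat) : Int)))).foldl pvJoinStep none] := by
    have hlen : (K.foldl pvStepB (List.replicate 6 none)).length = 6 := by
      rw [length_foldl_pvStepB]; simp
    apply List.ext_getElem?
    intro i
    rcases Nat.lt_or_ge i 6 with hi | hi
    · interval_cases i <;>
        first
          | simpa using hparts 0 (by omega)
          | simpa using hparts 1 (by omega)
          | simpa using hparts 2 (by omega)
          | simpa using hparts 3 (by omega)
          | simpa using hparts 4 (by omega)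
          | simpa using hparts 5 (by omega)
    · rw [List.getElem?_eq_none (by omega), List.getElem?_eq_none (by simp; omega)]
  rw [hexp]
  rw [PySem.List.slice_to _ (by norm_num), PySem.List.slice_from _ (by norm_num)]
  simp only [List.map_cons, List.map_nil, List.take, List.drop, List.nil_append,
    foldl_pvJoinStep_none]
  rw [bucket_main l 0 _ hpt_slot0, bucket_main l 1 _ hpt_slot1, bucket_main l 2 _ hpt_slot2,
    bucket_main l 3 _ hpt_slot3, bucket_main l 4 _ hpt_slot4, bucket_main l 5 _ hpt_slot5]
  rw [show Int.toNat 2 = 2 from rfl]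
  simp [← hK]
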